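-- pv_equiv track=rewrite | github.com/tsuru7/algorithm-study | tessoku/chap06/B37.py | solve
-- ===== SOURCE A (Python) =====
-- def solve(n):
--     n = str(n)
--     keta = len(n)
--     dp_smaller = [0 for _ in range(keta+1)]
--     dp_onhold = [0 for _ in range(keta+1)]
--     for i in range(keta):
--         di = int(n[i])
--         Di = int(n[:i]) if i > 0 else 0
--         dp_smaller[i+1] += dp_smaller[i]*10 + Di*45
--         dp_smaller[i+1] += dp_onhold[i]*di + (di-1)*di//2
--         dp_onhold[i+1] += dp_onhold[i] + di
--     return dp_smaller[keta] + dp_onhold[keta]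
-- ===== SOURCE B (Python) =====
-- def solve(n):
--     n = int(n)
--     total = 0
--     p = 1
--     while p <= n:
--         high = n // (p * 10)
--         cur = (n // p) % 10
--         low = n % p
--         total += 45 * p * high + cur * (cur - 1) // 2 * p + cur * (low + 1)
--         p *= 10
--     return total
-- ===== Notes on version B (the rewrite author's own statement) =====
-- stated objective: alternative
-- what changed: Replaces A's left-to-right two-array digit DP over str(n) (dp_smaller/dp_onhold with per-prefix int() reparsing) by a while-loop over place values p that adds, per digit position, a closed-form count built from the digits above p, the digit at p and the remainder below p.
-- crash fix: On negative n, A raises ValueError (it feeds the minus-sign character to int()) while B's while-loop body never runs and it returns the empty-sum total of zero. — e.g. on solve(-3): A raises ValueError, B returns 0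
import Mathlib
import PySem

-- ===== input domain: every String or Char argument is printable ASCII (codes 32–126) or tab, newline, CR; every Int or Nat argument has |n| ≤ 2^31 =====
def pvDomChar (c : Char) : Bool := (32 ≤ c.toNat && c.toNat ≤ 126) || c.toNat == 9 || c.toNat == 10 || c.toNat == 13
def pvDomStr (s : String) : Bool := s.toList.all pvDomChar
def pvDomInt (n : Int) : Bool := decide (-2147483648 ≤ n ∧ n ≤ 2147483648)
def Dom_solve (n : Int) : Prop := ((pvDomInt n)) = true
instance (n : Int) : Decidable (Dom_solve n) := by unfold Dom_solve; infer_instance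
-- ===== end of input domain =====

-- B replaces A's two-state digit DP over str(n) by a while-loop over place values adding a closed-form count per digit position (alternative algorithm, similar cost).

-- ===== PORT A =====
-- one iteration of A's 'for i in range(keta)' loop over the dp lists
def aStep (s : List Char) (st : List Int × List Int) (i : Int) : List Int × List Int :=
  let dps := st.1
  let dph := st.2
  let di : Int := (PySem.Int.ofChars? [PySem.List.pyGetD s i ' ']).getD 0
  let Di : Int := if i > 0 then (PySem.Int.ofChars? (PySem.List.slice s none (some i))).getD 0 else 0
  let dps := PySem.List.pySetD dps (i+1) (PySem.List.pyGetD dps (i+1) 0 + (PySem.List.pyGetD dps i 0 * 10 + Di * 45))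
  let dps := PySem.List.pySetD dps (i+1) (PySem.List.pyGetD dps (i+1) 0 + (PySem.List.pyGetD dph i 0 * di + PySem.Int.floordiv ((di - 1) * di) 2))
  let dph := PySem.List.pySetD dph (i+1) (PySem.List.pyGetD dph (i+1) 0 + (PySem.List.pyGetD dph i 0 + di))
  (dps, dph)

def solve (n : Int) : Int :=
  let s : List Char := PySem.Int.toChars n
  let keta : Int := PySem.List.len s
  let dp_smaller : List Int := (PySem.List.pyRange 0 (keta + 1)).map (fun _ => (0 : Int))
  let dp_onhold : List Int := (PySem.List.pyRange 0 (keta + 1)).map (fun _ => (0 : Int))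
  let st := (PySem.List.pyRange 0 keta).foldl (aStep s) (dp_smaller, dp_onhold)
  PySem.List.pyGetD st.1 keta 0 + PySem.List.pyGetD st.2 keta 0

-- ===== PORT B =====
-- the 'while p <= n' loop; fuel only makes the recursion structural (any fuel > number of digits of n gives the loop's value)
def bLoop : Nat → Int → Int → Int → Int
  | 0, _, _, total => total
  | fuel+1, n, p, total =>
    if p ≤ n then
      let high := PySem.Int.floordiv n (p * 10)
      let cur := PySem.Int.mod (PySem.Int.floordiv n p) 10
      let low := PySem.Int.mod n p
      bLoop fuel n (p * 10) (total + (45 * p * high + PySem.Int.floordiv (cur * (cur - 1)) 2 * p + cur * (low + 1)))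
    else total

def solve_alt (n : Int) : Int := bLoop (n.natAbs + 1) n 1 0

-- ===== PRECONDITION & SPEC =====
-- A raises ValueError on negative n (it tries int('-')); Pre_ excludes exactly those inputs.
def Pre_solve (n : Int) : Prop := 0 ≤ n
instance (n : Int) : Decidable (Pre_solve n) := by unfold Pre_solve; infer_instance
def pvWitness_solve : Int := (7)

-- On negative n, A raises ValueError (int('-') on the sign character) while B's empty while-loop returns 0.
def Raises_solve (n : Int) : Prop := n < 0
instance (n : Int) : Decidable (Raises_solve n) := by unfold Raises_solve; infer_instance
def pvRaiseWitness_solve : Int := (-3)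
def pvRaiseWitnessOut_solve : Int := 0

def Spec_solve (n : Int) (out : Int) : Prop := out = solve_alt n
instance (n : Int) (out : Int) : Decidable (Spec_solve n out) := by unfold Spec_solve; infer_instance

-- ===== CLAIM (what is proved, stated in full; the proofs are below) =====
def Claim_equal_solve : Prop := ∀ (n : Int), Dom_solve n → Pre_solve n → Spec_solve n (solve n)
def Claim_raises_solve : Prop := (∀ (n : Int), Dom_solve n → Raises_solve n → ¬ Pre_solve n) ∧ (Dom_solve (pvRaiseWitness_solve) ∧ Raises_solve (pvRaiseWitness_solve) ∧ solve_alt (pvRaiseWitness_solve) = pvRaiseWitnessOut_solve)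

-- ===== LEMMAS AND PROOFS =====

-- digit value of a digit character
def dNat (c : Char) : Nat := c.toNat - 48

-- value of a decimal digit string
def valNat (ds : List Char) : Nat := ds.foldl (fun a c => a * 10 + dNat c) 0

-- digit sum of a natural number
def dsum : Nat → Nat
  | 0 => 0
  | v+1 => dsum ((v+1)/10) + (v+1) % 10
decreasing_by exact Nat.div_lt_self (Nat.succ_pos v) (by norm_num)

-- S v = sum of the digit sums of 0..v, written through its base-10 recurrence
def S : Nat → Int
  | 0 => 0
  | v+1 => 10 * S ((v+1)/10) + 45 * (((v+1)/10 : Nat) : Int)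
      + ((((v+1) % 10) * ((v+1) % 10 + 1) / 2 : Nat) : Int)
      - (9 - (((v+1) % 10 : Nat) : Int)) * (dsum ((v+1)/10) : Int)
decreasing_by exact Nat.div_lt_self (Nat.succ_pos v) (by norm_num)

-- A's loop state at spec level: (dp_smaller[i], dp_onhold[i], value of the first i digits)
def tstep (t : Int × Int × Int) (c : Char) : Int × Int × Int :=
  (t.1 * 10 + t.2.2 * 45 + t.2.1 * (dNat c : Int) + ((dNat c : Int) - 1) * (dNat c : Int) / 2,
   t.2.1 + (dNat c : Int), t.2.2 * 10 + (dNat c : Int))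

def trip (ds : List Char) : Int × Int × Int := ds.foldl tstep (0, 0, 0)

theorem digit_bounds {c : Char} (h : c.isDigit = true) : 48 ≤ c.toNat ∧ c.toNat ≤ 57 := by
  simp [Char.isDigit] at h
  exact ⟨h.1, h.2⟩

theorem digit_not_space {c : Char} (h : c.isDigit = true) : PySem.Int.isIntSpace c = false := by
  have hb := digit_bounds h
  have h1 : c ≠ ' ' := fun he => by subst he; simp [Char.toNat] at hb
  have h2 : c ≠ '\t' := fun he => by subst he; simp [Char.toNat] at hb
  have h3 : c ≠ '\n' := fun he => by subst he; simp [Char.toNat] at hb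
  have h4 : c ≠ '\x0d' := fun he => by subst he; simp [Char.toNat] at hb
  have h5 : c ≠ '\x0b' := fun he => by subst he; simp [Char.toNat] at hb
  have h6 : c ≠ '\x0c' := fun he => by subst he; simp [Char.toNat] at hb
  simp [PySem.Int.isIntSpace, h1, h2, h3, h4, h5, h6]

theorem dropWhile_digits {ds : List Char} (hd : ∀ c ∈ ds, c.isDigit = true) :
    List.dropWhile PySem.Int.isIntSpace ds = ds := by
  cases ds with
  | nil => rfl
  | cons c rest => simp [digit_not_space (hd c (by simp))]
theorem extract : ∃ G : List Char → Bool → Nat → Option Nat,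
    (∀ cs : List Char, PySem.Int.ofChars? cs =
      (match (List.dropWhile PySem.Int.isIntSpace (List.dropWhile PySem.Int.isIntSpace cs).reverse).reverse with
        | '-' :: ds => Option.map (fun n => -n) (do let a ← (match ds with | [] => none | es => G es false 0); pure (a : Int))
        | '+' :: ds => Option.map (fun n => n) (do let a ← (match ds with | [] => none | es => G es false 0); pure (a : Int))
        | ds => Option.map (fun n => n) (do let a ← (match ds with | [] => none | es => G es false 0); pure (a : Int)))) ∧
    (∀ b acc, G [] b acc = if b = true then some acc else none) ∧
    (∀ c rest b acc, G (c :: rest) b acc =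
      if c.isDigit = true then G rest true (acc * 10 + (c.toNat - '0'.toNat))
      else if c = '_' ∧ b = true then
        (match rest with
          | d :: _ => if d.isDigit = true then G rest false acc else none
          | [] => none)
      else none) :=
  ⟨_, fun _ => rfl, fun _ _ => rfl, fun _ _ _ _ => rfl⟩

theorem parse_digits (ds : List Char) (hne : ds ≠ []) (hd : ∀ c ∈ ds, c.isDigit = true) :
    PySem.Int.ofChars? ds = some ((valNat ds : Nat) : Int) := by
  obtain ⟨G, hof, hnil, hcons⟩ := extract
  have key : ∀ (l : List Char) (acc : Nat), (∀ c ∈ l, c.isDigit = true) →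
      G l true acc = some (l.foldl (fun a c => a * 10 + dNat c) acc) := by
    intro l
    induction l with
    | nil => intro acc _; simp [hnil]
    | cons c rest ih =>
      intro acc hl
      rw [hcons, if_pos (hl c (by simp))]
      have : c.toNat - '0'.toNat = dNat c := rfl
      rw [this, ih _ (fun x hx => hl x (by simp [hx]))]
      rfl
  have hstrip : (List.dropWhile PySem.Int.isIntSpace
      (List.dropWhile PySem.Int.isIntSpace ds).reverse).reverse = ds := by
    rw [dropWhile_digits hd, dropWhile_digits (by simpa using hd), List.reverse_reverse]
  obtain ⟨c, rest, rfl⟩ : ∃ c rest, ds = c :: rest := by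
    cases ds with | nil => exact absurd rfl hne | cons c r => exact ⟨c, r, rfl⟩
  have hcd : c.isDigit = true := hd c (by simp)
  have hcm : c ≠ '-' := fun he => by subst he; simp [Char.isDigit] at hcd
  have hcp : c ≠ '+' := fun he => by subst he; simp [Char.isDigit] at hcd
  rw [hof, hstrip]
  split
  · next ds' heq => exact absurd (List.cons.inj heq).1 hcm
  · next ds' heq => exact absurd (List.cons.inj heq).1 hcp
  · next ds' h1 h2 =>
    have : (match c :: rest with | [] => none | es => G es false 0) = G (c :: rest) false 0 := rfl
    rw [this, hcons, if_pos hcd]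
    have : c.toNat - '0'.toNat = dNat c := rfl
    rw [this, key rest _ (fun x hx => hd x (by simp [hx]))]
    simp [valNat]

theorem digitChar_toNat {r : Nat} (h : r < 10) : (Nat.digitChar r).toNat = 48 + r := by
  interval_cases r <;> decide
theorem valNat_append (ds : List Char) (c : Char) : valNat (ds ++ [c]) = valNat ds * 10 + dNat c := by
  simp [valNat, List.foldl_append]
theorem valNat_toDigits (m : Nat) : valNat (Nat.toDigits 10 m) = m := by
  induction m using Nat.strong_induction_on with
  | _ m ih =>
    rw [Nat.toDigits_eq_if (by norm_num)]
    by_cases hm : m < 10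
    · rw [if_pos hm]
      simp [valNat, dNat, digitChar_toNat hm]
    · rw [if_neg hm]
      rw [valNat_append, ih (m / 10) (Nat.div_lt_self (by omega) (by norm_num))]
      have : dNat (m % 10).digitChar = m % 10 := by
        simp [dNat, digitChar_toNat (Nat.mod_lt m (by norm_num))]
      omega
theorem dsum_rec (v d : Nat) (h : d < 10) : dsum (10 * v + d) = dsum v + d := by
  rcases Nat.eq_zero_or_pos (10 * v + d) with h0 | h0
  · have hv : v = 0 := by omega
    have hd : d = 0 := by omega
    subst hv; subst hd; simp [dsum]
  · obtain ⟨w, hw⟩ : ∃ w, 10 * v + d = w + 1 := ⟨10 * v + d - 1, by omega⟩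
    rw [hw, dsum]
    rw [← hw]
    have h1 : (10 * v + d) / 10 = v := by omega
    have h2 : (10 * v + d) % 10 = d := by omega
    rw [h1, h2]
theorem S_rec (v d : Nat) (h : d < 10) :
    S (10 * v + d) = 10 * S v + 45 * (v : Int) + ((d * (d + 1) / 2 : Nat) : Int)
      - (9 - (d : Int)) * (dsum v : Int) := by
  rcases Nat.eq_zero_or_pos (10 * v + d) with h0 | h0
  · have hv : v = 0 := by omega
    have hd : d = 0 := by omega
    subst hv; subst hd; simp [S, dsum]
  · obtain ⟨w, hw⟩ : ∃ w, 10 * v + d = w + 1 := ⟨10 * v + d - 1, by omega⟩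
    rw [hw, S, ← hw]
    have h1 : (10 * v + d) / 10 = v := by omega
    have h2 : (10 * v + d) % 10 = d := by omega
    rw [h1, h2]

theorem half_cast {D : Nat} (h : D ≤ 9) : ((D : Int) - 1) * D / 2 + D = ((D * (D + 1) / 2 : Nat) : Int) := by
  interval_cases D <;> decide

theorem dNat_le {c : Char} (h : c.isDigit = true) : dNat c ≤ 9 := by
  have hb := digit_bounds h
  unfold dNat
  omega

theorem trip_inv (ds : List Char) (hd : ∀ c ∈ ds, c.isDigit = true) :
    (trip ds).2.2 = (valNat ds : Int) ∧ (trip ds).2.1 = (dsum (valNat ds) : Int) ∧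
      (trip ds).1 + (trip ds).2.1 = S (valNat ds) := by
  induction ds using List.reverseRecOn with
  | nil => simp [trip, valNat, dsum, S]
  | append_singleton ds c ih =>
    obtain ⟨h1, h2, h3⟩ := ih (fun x hx => hd x (by simp [hx]))
    have hD : dNat c ≤ 9 := dNat_le (hd c (by simp))
    have hv : valNat (ds ++ [c]) = 10 * valNat ds + dNat c := by rw [valNat_append]; ring
    have hds : dsum (10 * valNat ds + dNat c) = dsum (valNat ds) + dNat c := dsum_rec _ _ (by omega)
    have hS := S_rec (valNat ds) (dNat c) (by omega)
    have hhalf := half_cast hD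
    have ht : trip (ds ++ [c]) = tstep (trip ds) c := by simp [trip, List.foldl_append]
    refine ⟨?_, ?_, ?_⟩
    · rw [ht, hv]; simp [tstep, h1]; ring
    · rw [ht, hv, hds]; simp [tstep, h2]
    · rw [ht, hv, hS]
      simp only [tstep]
      rw [h1, h2]
      linear_combination hhalf + 10 * h3 - 10 * h2

theorem bLoop_acc (f : Nat) : ∀ (n p t : Int), bLoop f n p t = t + bLoop f n p 0 := by
  induction f with
  | zero => intro n p t; simp [bLoop]
  | succ f ih =>
    intro n p t
    by_cases h : p ≤ n
    · simp only [bLoop, if_pos h]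
      rw [ih n (p*10), ih n (p*10) (0 + _)]
      ring
    · simp [bLoop, if_neg h]

-- Euclidean div/mod identities linking n and n / 10 at place p
theorem place_div (n p : Int) (_hn : 0 ≤ n) (_hp : 1 ≤ p) : n / (p * 10) = (n / 10) / p := by
  rw [mul_comm]
  rw [Int.ediv_ediv_of_nonneg (by norm_num)]
theorem place_mod (n p : Int) (_hn : 0 ≤ n) (hp : 1 ≤ p) :
    n % (p * 10) = 10 * ((n / 10) % p) + n % 10 := by
  have h10 : (0:Int) < 10 := by norm_num
  have hpp : (0:Int) < p := by omega
  have h1 := Int.mul_ediv_add_emod n 10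
  have h2 := Int.mul_ediv_add_emod (n / 10) p
  have hb1 := Int.emod_nonneg n (by norm_num : (10:Int) ≠ 0)
  have hb2 := Int.emod_lt_of_pos n h10
  have hb3 := Int.emod_nonneg (n / 10) (by omega : p ≠ 0)
  have hb4 := Int.emod_lt_of_pos (n / 10) hpp
  have key : n / (p * 10) = (n/10)/p ∧ n % (p * 10) = 10 * ((n / 10) % p) + n % 10 := by
    have hu := (Int.ediv_emod_unique (a := n) (b := p * 10)
      (q := (n/10)/p) (r := 10 * ((n / 10) % p) + n % 10) (by positivity)).mpr ?_
    · exact ⟨hu.1, hu.2⟩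
    · constructor
      · nlinarith [h1, h2]
      · constructor
        · nlinarith
        · nlinarith
  exact key.2

theorem ediv_lt_of_lt_mul {n p : Int} (_hn : 0 ≤ n) (_hp : 0 < p) (h : n < 10 * p) : n / 10 < p := by
  exact Int.ediv_lt_of_lt_mul (by norm_num) (by linarith)

theorem bLoop_shift (f : Nat) : ∀ (n p : Int), 0 ≤ n → 1 ≤ p → n < 10 ^ f * (10 * p) →
    bLoop f n (10 * p) 0 = 10 * bLoop f (n / 10) p 0
      - (9 - n % 10) * (dsum ((n / 10) / p).toNat : Int) := by
  induction f with
  | zero =>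
    intro n p hn hp hf
    simp only [pow_zero, one_mul] at hf
    have hv : n / 10 < p := ediv_lt_of_lt_mul hn (by omega) hf
    have hvp : (n / 10) / p = 0 := Int.ediv_eq_zero_of_lt (Int.ediv_nonneg hn (by norm_num)) hv
    simp [bLoop, hvp, dsum]
  | succ f ih =>
    intro n p hn hp hf
    have hd0 : 0 ≤ n % 10 := Int.emod_nonneg n (by norm_num)
    have hd9 : n % 10 < 10 := Int.emod_lt_of_pos n (by norm_num)
    by_cases hle : 10 * p ≤ n
    · -- both loops take a step
      have hle' : p ≤ n / 10 := by
        rw [Int.le_ediv_iff_mul_le (by norm_num : (0:Int) < 10)]; linarith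
      have hvn : 0 ≤ n / 10 := Int.ediv_nonneg hn (by norm_num)
      -- unfold one step of each loop
      rw [show bLoop (f+1) n (10*p) 0 = bLoop f n ((10*p)*10)
            (0 + (45 * (10*p) * PySem.Int.floordiv n ((10*p) * 10)
              + PySem.Int.floordiv ((PySem.Int.mod (PySem.Int.floordiv n (10*p)) 10) * ((PySem.Int.mod (PySem.Int.floordiv n (10*p)) 10) - 1)) 2 * (10*p)
              + (PySem.Int.mod (PySem.Int.floordiv n (10*p)) 10) * (PySem.Int.mod n (10*p) + 1)))
          from by simp only [bLoop, if_pos hle]]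
      rw [show bLoop (f+1) (n/10) p 0 = bLoop f (n/10) (p*10)
            (0 + (45 * p * PySem.Int.floordiv (n/10) (p * 10)
              + PySem.Int.floordiv ((PySem.Int.mod (PySem.Int.floordiv (n/10) p) 10) * ((PySem.Int.mod (PySem.Int.floordiv (n/10) p) 10) - 1)) 2 * p
              + (PySem.Int.mod (PySem.Int.floordiv (n/10) p) 10) * (PySem.Int.mod (n/10) p + 1)))
          from by simp only [bLoop, if_pos hle']]
      rw [bLoop_acc, bLoop_acc f (n/10)]
      -- rewrite pysem ops to ediv/emod
      have P1 : (0:Int) < 10 := by norm_num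
      have P2 : 0 < p := by omega
      have P3 : 0 < 10 * p := by omega
      have P4 : 0 < (10 * p) * 10 := mul_pos P3 P1
      have P5 : 0 < p * 10 := mul_pos P2 P1
      simp only [PySem.Int.floordiv_eq_ediv_of_pos P4, PySem.Int.floordiv_eq_ediv_of_pos P3,
          PySem.Int.floordiv_eq_ediv_of_pos P5, PySem.Int.floordiv_eq_ediv_of_pos P2,
          PySem.Int.mod_eq_emod_of_pos P1, PySem.Int.mod_eq_emod_of_pos P3,
          PySem.Int.mod_eq_emod_of_pos P2]
      -- place identities
      have hdiv1 : n / (10 * p) = (n / 10) / p := by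
        rw [mul_comm 10 p]; exact place_div n p hn hp
      have hdiv2 : n / ((10 * p) * 10) = (n / 10) / (p * 10) := by
        rw [mul_comm 10 p]
        exact place_div n (p * 10) hn (by omega)
      have hmod1 : n % (10 * p) = 10 * ((n / 10) % p) + n % 10 := by
        rw [mul_comm 10 p]; exact place_mod n p hn hp
      -- IH at place 10*p
      have hih := ih n (10 * p) hn (by omega) (by ring_nf; ring_nf at hf; linarith)
      rw [show (10*p)*10 = 10 * (10 * p) from by ring] at *
      rw [hih]
      -- digit-sum chain: dsum (v/p) = dsum (v/(10 p)) + (v/p) % 10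
      have hvv : (n / 10) / (10 * p) = ((n / 10) / p) / 10 := by
        rw [mul_comm 10 p, ← Int.ediv_ediv_of_nonneg (by omega)]
      have hcur0 : 0 ≤ ((n/10)/p) % 10 := Int.emod_nonneg _ (by norm_num)
      have hcur9 : ((n/10)/p) % 10 < 10 := Int.emod_lt_of_pos _ (by norm_num)
      have hq : 0 ≤ (n/10)/p := Int.ediv_nonneg hvn (by omega)
      have hds : dsum (((n/10)/p).toNat) = dsum (((n/10)/(10*p)).toNat) + (((n/10)/p) % 10).toNat := by
        rw [hvv]
        have := dsum_rec (((n/10)/p)/10).toNat (((n/10)/p) % 10).toNat (by omega)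
        rw [← this]
        congr 1
        omega
      rw [hds, hdiv1, hdiv2, hmod1]
      push_cast
      have he : ((n/10)/p) % 10 ≥ 0 := hcur0
      rw [show ((((n/10)/p) % 10).toNat : Int) = ((n/10)/p) % 10 from by omega]
      have hcomm : (n/10) / (p * 10) = (n/10) / (10 * p) := by rw [mul_comm]
      rw [hcomm]
      ring_nf
    · -- neither loop runs
      have hlt : n < 10 * p := by omega
      have hv : n / 10 < p := ediv_lt_of_lt_mul hn (by omega) hlt
      have hvp : (n / 10) / p = 0 := Int.ediv_eq_zero_of_lt (Int.ediv_nonneg hn (by norm_num)) hv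
      have hle' : ¬ (p ≤ n / 10) := by omega
      simp [bLoop, hle, hle', hvp, dsum]

theorem bLoop_S (f : Nat) : ∀ (n : Int), 0 ≤ n → n < 10 ^ f → bLoop f n 1 0 = S n.toNat := by
  induction f with
  | zero =>
    intro n hn hf
    simp only [pow_zero] at hf
    have : n = 0 := by omega
    subst this
    simp [bLoop, S]
  | succ f ih =>
    intro n hn hf
    by_cases h1 : (1:Int) ≤ n
    · have hd0 : 0 ≤ n % 10 := Int.emod_nonneg n (by norm_num)
      have hd9 : n % 10 < 10 := Int.emod_lt_of_pos n (by norm_num)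
      have hvn : 0 ≤ n / 10 := Int.ediv_nonneg hn (by norm_num)
      rw [show bLoop (f+1) n 1 0 = bLoop f n (1*10)
            (0 + (45 * 1 * PySem.Int.floordiv n (1 * 10)
              + PySem.Int.floordiv ((PySem.Int.mod (PySem.Int.floordiv n 1) 10) * ((PySem.Int.mod (PySem.Int.floordiv n 1) 10) - 1)) 2 * 1
              + (PySem.Int.mod (PySem.Int.floordiv n 1) 10) * (PySem.Int.mod n 1 + 1)))
          from by simp only [bLoop, if_pos h1]]
      rw [bLoop_acc]
      have hshift := bLoop_shift f n 1 hn (by norm_num) (by rw [pow_succ] at hf; nlinarith [pow_pos (show (0:Int) < 10 by norm_num) f])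
      rw [show (1:Int)*10 = 10*1 from by ring, hshift]
      have hv10 : n / 10 < 10 ^ f := by
        rw [pow_succ] at hf
        exact Int.ediv_lt_of_lt_mul (by norm_num) (by linarith)
      rw [Int.ediv_one, ih (n/10) hvn hv10]
      rw [show ((10:Int)*1) = 10 from by norm_num] at *
      rw [PySem.Int.floordiv_eq_ediv_of_pos (by norm_num : (0:Int) < 10),
          PySem.Int.floordiv_eq_ediv_of_pos (by norm_num : (0:Int) < 1),
          PySem.Int.floordiv_eq_ediv_of_pos (by norm_num : (0:Int) < 2),
          PySem.Int.mod_eq_emod_of_pos (by norm_num : (0:Int) < 10),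
          PySem.Int.mod_eq_emod_of_pos (by norm_num : (0:Int) < 1)]
      rw [Int.ediv_one, Int.emod_one]
      -- S recurrence at n.toNat = 10 * (n/10).toNat + (n%10).toNat
      have hS := S_rec (n/10).toNat (n % 10).toNat (by omega)
      have hnt : n.toNat = 10 * (n/10).toNat + (n % 10).toNat := by omega
      rw [hnt, hS]
      have hc1 : (((n/10).toNat : Int)) = n / 10 := by omega
      have hc2 : (((n % 10).toNat : Int)) = n % 10 := by omega
      have hhalf : ((((n % 10).toNat) * ((n % 10).toNat + 1) / 2 : Nat) : Int)
          = (n % 10) * ((n % 10) - 1) / 2 + (n % 10) := by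
        have h2 : (n % 10).toNat ≤ 9 := by omega
        set D := (n % 10).toNat with hDdef
        have : n % 10 = (D : Int) := by omega
        rw [this]
        interval_cases D <;> decide
      rw [hhalf, hc1, hc2]
      ring
    · have : n = 0 := by omega
      subst this
      simp [bLoop, S]

theorem solve_alt_eq_S (n : Int) (h : 0 ≤ n) : solve_alt n = S n.toNat := by
  unfold solve_alt
  apply bLoop_S
  · exact h
  · have h1 : (n.natAbs : Int) < 10 ^ n.natAbs := by
      exact_mod_cast Nat.lt_pow_self (by norm_num) (n := n.natAbs)
    have h2 : ((10:Int)) ^ n.natAbs ≤ 10 ^ (n.natAbs + 1) := by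
      apply pow_le_pow_right₀ (by norm_num)
      omega
    omega

theorem getD_set_lemma (l : List Int) (i j : Nat) (v : Int) :
    (l.set i v).getD j 0 = if i = j ∧ i < l.length then v else l.getD j 0 := by
  rw [List.getD_eq_getElem?_getD, List.getD_eq_getElem?_getD, List.getElem?_set]
  by_cases hij : i = j <;> by_cases hl : i < l.length <;>
    subst_eqs <;> simp [hl] <;> split <;> simp_all

theorem aux (s : List Char) (hd : ∀ c ∈ s, c.isDigit = true) :
    ∀ k, k ≤ s.length →
      (((PySem.List.pyRange 0 (k : Int)).foldl (aStep s)
          (List.replicate (s.length + 1) 0, List.replicate (s.length + 1) 0)).1.length = s.length + 1) ∧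
      (((PySem.List.pyRange 0 (k : Int)).foldl (aStep s)
          (List.replicate (s.length + 1) 0, List.replicate (s.length + 1) 0)).2.length = s.length + 1) ∧
      (((PySem.List.pyRange 0 (k : Int)).foldl (aStep s)
          (List.replicate (s.length + 1) 0, List.replicate (s.length + 1) 0)).1.getD k 0 = (trip (s.take k)).1) ∧
      (((PySem.List.pyRange 0 (k : Int)).foldl (aStep s)
          (List.replicate (s.length + 1) 0, List.replicate (s.length + 1) 0)).2.getD k 0 = (trip (s.take k)).2.1) ∧
      (∀ j : Nat, k < j →
        (((PySem.List.pyRange 0 (k : Int)).foldl (aStep s)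
          (List.replicate (s.length + 1) 0, List.replicate (s.length + 1) 0)).1.getD j 0 = 0 ∧
         ((PySem.List.pyRange 0 (k : Int)).foldl (aStep s)
          (List.replicate (s.length + 1) 0, List.replicate (s.length + 1) 0)).2.getD j 0 = 0)) := by
  intro k
  induction k with
  | zero =>
    intro _
    simp [trip]
  | succ k ih =>
    intro hk1
    have hk : k < s.length := by omega
    obtain ⟨hl1, hl2, hg1, hg2, hz⟩ := ih (by omega)
    have hrange : PySem.List.pyRange 0 ((k+1 : Nat) : Int) = PySem.List.pyRange 0 (k : Int) ++ [(k : Int)] := by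
      push_cast
      exact PySem.List.pyRange_one_succ_right (by positivity)
    rw [hrange, List.foldl_append]
    set st := (PySem.List.pyRange 0 (k : Int)).foldl (aStep s)
      (List.replicate (s.length + 1) 0, List.replicate (s.length + 1) 0) with hst
    -- the digit read
    have hsk : PySem.List.pyGetD s (k : Int) ' ' = s[k] := by
      rw [PySem.List.pyGetD_natCast, List.getD_eq_getElem?_getD, List.getElem?_eq_getElem hk]
      rfl
    have hdig : (s[k]).isDigit = true := hd _ (List.getElem_mem hk)
    have hdi : (PySem.Int.ofChars? [PySem.List.pyGetD s (k : Int) ' ']).getD 0 = ((dNat s[k] : Nat) : Int) := by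
      rw [hsk, parse_digits [s[k]] (by simp) (by simpa using hdig)]
      simp [valNat]
    -- the prefix read
    have htake : ∀ c ∈ s.take k, c.isDigit = true := fun c hc => hd c (List.mem_of_mem_take hc)
    have hDi : (if (k : Int) > 0 then (PySem.Int.ofChars? (PySem.List.slice s none (some (k : Int)))).getD 0 else 0)
        = (trip (s.take k)).2.2 := by
      rcases Nat.eq_zero_or_pos k with h0 | h0
      · subst h0; simp [trip]
      · rw [if_pos (by exact_mod_cast h0)]
        rw [PySem.List.slice_to_natCast]
        have hne : s.take k ≠ [] := by
          have : (s.take k).length = k := by simp [List.length_take]; omega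
          intro he; rw [he] at this; simp at this; omega
        rw [parse_digits _ hne htake, (trip_inv _ htake).1]
        simp
    have htake1 : s.take (k+1) = s.take k ++ [s[k]] := by
      have h := List.take_concat_get (l := s) (i := k) hk
      rw [List.concat_eq_append] at h
      exact h.symm
    have htrip1 : trip (s.take (k+1)) = tstep (trip (s.take k)) s[k] := by
      rw [htake1, trip, List.foldl_append]; rfl
    have hfd : PySem.Int.floordiv ((((dNat s[k] : Nat) : Int) - 1) * ((dNat s[k] : Nat) : Int)) 2
        = (((dNat s[k] : Nat) : Int) - 1) * ((dNat s[k] : Nat) : Int) / 2 :=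
      PySem.Int.floordiv_eq_ediv_of_pos (by norm_num)
    simp only [List.foldl_cons, List.foldl_nil]
    rw [aStep]
    simp only [hdi, hDi, hfd]
    rw [show ((k : Int) + 1) = ((k+1 : Nat) : Int) from by push_cast; ring]
    simp only [PySem.List.pySetD_natCast, PySem.List.pyGetD_natCast]
    have e1 : st.1.getD (k+1) 0 = 0 := (hz (k+1) (by omega)).1
    have e2 : st.2.getD (k+1) 0 = 0 := (hz (k+1) (by omega)).2
    have hlen1 : k + 1 < s.length + 1 := by omega
    refine ⟨by simp [hl1], by simp [hl2], ?_, ?_, ?_⟩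
    · rw [getD_set_lemma, if_pos ⟨rfl, by simp [hl1]; omega⟩]
      rw [getD_set_lemma, if_pos ⟨rfl, by rw [hl1]; omega⟩]
      rw [htrip1, tstep]
      rw [e1, hg1, hg2]
      ring
    · rw [getD_set_lemma, if_pos ⟨rfl, by rw [hl2]; omega⟩]
      rw [htrip1, tstep]
      rw [e2, hg2]
      ring
    · intro j hj
      constructor
      · rw [getD_set_lemma, if_neg (by omega), getD_set_lemma, if_neg (by omega)]
        exact (hz j (by omega)).1
      · rw [getD_set_lemma, if_neg (by omega)]
        exact (hz j (by omega)).2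

theorem solve_eq_S (n : Int) (h : 0 ≤ n) : solve n = S n.toNat := by
  have hchars : PySem.Int.toChars n = Nat.toDigits 10 n.toNat := by
    rw [PySem.Int.toChars, if_neg (by omega)]
  simp only [solve, hchars, PySem.List.len_eq]
  set s : List Char := Nat.toDigits 10 n.toNat with hs
  have hd : ∀ c ∈ s, c.isDigit = true := fun c hc =>
    Nat.isDigit_of_mem_toDigits (by norm_num) (by norm_num) hc
  have hinit : (PySem.List.pyRange 0 (((s.length : Nat) : Int) + 1)).map (fun _ => (0:Int))
      = List.replicate (s.length + 1) 0 := by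
    rw [show (((s.length : Nat) : Int) + 1) = ((s.length + 1 : Nat) : Int) from by push_cast; ring]
    rw [PySem.List.pyRange_zero_natCast]
    rw [List.map_map]
    apply List.eq_replicate_iff.mpr
    refine ⟨by simp, ?_⟩
    intro b hb
    simp at hb
    omega
  rw [hinit]
  obtain ⟨hl1, hl2, hg1, hg2, hz⟩ := aux s hd s.length (le_refl _)
  rw [PySem.List.pyGetD_natCast, PySem.List.pyGetD_natCast, hg1, hg2]
  rw [List.take_length]
  obtain ⟨t1, t2, t3⟩ := trip_inv s hd
  rw [t3, valNat_toDigits]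

-- ===== VERDICT (by name: the statement is the Claim_ definition above) =====
theorem solve_spec : Claim_equal_solve := by
  intro n _ hpre
  unfold Spec_solve
  rw [solve_eq_S n hpre, solve_alt_eq_S n hpre]

theorem solve_raises : Claim_raises_solve := by
  unfold Claim_raises_solve
  constructor
  · intro n _ h
    unfold Pre_solve
    unfold Raises_solve at h
    omega
  · refine ⟨by decide, by decide, ?_⟩
    decide

-- self-check: the raise witness really lies inside Raises_ and outside Pre_
theorem solve_raises_witness_ok : Raises_solve pvRaiseWitness_solve ∧ ¬ Pre_solve pvRaiseWitness_solve := by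
  have h := solve_raises
  unfold Claim_raises_solve at h
  exact ⟨h.2.2.1, h.1 _ (by decide) h.2.2.1⟩
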